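-- pv_equiv track=rewrite | github.com/sarbeshtiwari/arc-agi-3 | environment_files/vx01/vx01.py | _make_x_pattern
-- ===== SOURCE A (Python) =====
-- C_BLACK         = 0
--
-- def _make_x_pattern(T, color):
--     if T == 1:
--         return [[color]]
--     rows = []
--     for r in range(T):
--         row = [C_BLACK] * T
--         row[r] = color
--         row[T - 1 - r] = color
--         rows.append(row)
--     return rows
-- ===== SOURCE B (Python) =====
-- C_BLACK = 0
--
-- def _make_x_pattern(T, color):
--     # Build only the top half of the X by concatenating segments
--     # (zeros, color, zeros[, color, zeros]), then mirror it for the bottom.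
--     top = []
--     for r in range((T + 1) // 2):
--         left = [C_BLACK] * r
--         if 2 * r == T - 1:
--             top.append(left + [color] + left)
--         else:
--             top.append(left + [color] + [C_BLACK] * (T - 2 - 2 * r) + [color] + left)
--     bottom = [row[:] for row in top[:T // 2]]
--     bottom.reverse()
--     return top + bottom
-- ===== Notes on version B (the rewrite author's own statement) =====
-- stated objective: alternative
-- what changed: Instead of looping over all T rows and stamping two diagonal cells into a preallocated zero row, B constructs only the ceil(T/2) top rows by concatenating zero/color segments and obtains the bottom rows by reversing (mirroring) the top half, exploiting the pattern's vertical symmetry; the T==1 special case disappears.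
import Mathlib
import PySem

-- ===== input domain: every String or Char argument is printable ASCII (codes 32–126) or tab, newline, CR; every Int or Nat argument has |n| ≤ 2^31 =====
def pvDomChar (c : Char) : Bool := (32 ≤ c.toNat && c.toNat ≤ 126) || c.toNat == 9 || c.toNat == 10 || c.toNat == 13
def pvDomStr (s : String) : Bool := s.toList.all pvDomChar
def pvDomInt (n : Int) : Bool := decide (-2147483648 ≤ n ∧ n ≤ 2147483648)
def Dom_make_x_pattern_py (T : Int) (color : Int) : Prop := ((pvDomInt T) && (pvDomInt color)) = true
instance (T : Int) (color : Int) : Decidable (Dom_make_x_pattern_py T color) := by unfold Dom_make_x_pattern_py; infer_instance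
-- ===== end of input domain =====

-- B builds only the top half of the X by concatenating zero/color segments and
-- mirrors it for the bottom half, instead of A's loop over all T rows stamping
-- two cells into a zeroed row; return values are identical (objective: alternative).

-- ===== PORT A =====
def make_x_pattern_py (T : Int) (color : Int) : List (List Int) :=
  if T == 1 then [[color]]
  else
    (PySem.List.pyRange 0 T 1).foldl
      (fun rows r =>
        let row := PySem.List.pyRepeat [(0 : Int)] T
        let row := PySem.List.pySetD row r color
        let row := PySem.List.pySetD row (T - 1 - r) color
        rows ++ [row]) []

-- ===== PORT B =====
def make_x_pattern_py_alt (T : Int) (color : Int) : List (List Int) :=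
  let top := (PySem.List.pyRange 0 (PySem.Int.floordiv (T + 1) 2) 1).foldl
    (fun acc r =>
      let left := PySem.List.pyRepeat [(0 : Int)] r
      acc ++ [if 2 * r == T - 1 then left ++ [color] ++ left
              else left ++ [color] ++ PySem.List.pyRepeat [(0 : Int)] (T - 2 - 2 * r)
                   ++ [color] ++ left]) []
  let bottom := ((PySem.List.slice top none (some (PySem.Int.floordiv T 2))).map
    (fun row => PySem.List.slice row none none)).reverse
  top ++ bottom

-- ===== PRECONDITION & SPEC =====
def Spec_make_x_pattern_py (T : Int) (color : Int) (out : List (List Int)) : Prop := out = make_x_pattern_py_alt T color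
instance (T : Int) (color : Int) (out : List (List Int)) : Decidable (Spec_make_x_pattern_py T color out) := by unfold Spec_make_x_pattern_py; infer_instance

-- ===== CLAIM (what is proved, stated in full; the proofs are below) =====
def Claim_equal_make_x_pattern_py : Prop := ∀ (T : Int) (color : Int), Dom_make_x_pattern_py T color → Spec_make_x_pattern_py T color (make_x_pattern_py T color)

-- ===== LEMMAS AND PROOFS =====

-- Common reference form: the grid as a per-cell Nat-indexed map.
def pvRowN (n : Nat) (color : Int) (r : Nat) : List Int :=
  (List.range n).map (fun c => if c = r ∨ c = n - 1 - r then color else 0)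

def pvGridN (n : Nat) (color : Int) : List (List Int) :=
  (List.range n).map (pvRowN n color)

-- A's mutated row equals the per-cell row, for any in-range row index r.
theorem pv_row_eq (T color r : Int) (h0 : 0 ≤ r) (h1 : r < T) :
    PySem.List.pySetD (PySem.List.pySetD (PySem.List.pyRepeat [(0 : Int)] T) r color) (T - 1 - r) color
      = pvRowN T.toNat color r.toNat := by
  have hr' : 0 ≤ T - 1 - r := by omega
  rw [PySem.List.pyRepeat_singleton, PySem.List.pySetD_of_nonneg _ color h0,
      PySem.List.pySetD_of_nonneg _ color hr', pvRowN]
  apply List.ext_getElem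
  · simp
  · intro k hk hk'
    simp only [List.getElem_set, List.getElem_replicate, List.getElem_map, List.getElem_range]
    have hkT : k < T.toNat := by simpa using hk
    split_ifs with hA hB <;> simp_all <;> omega

-- A equals the reference grid.

theorem pv_a_eq (T color : Int) : make_x_pattern_py T color = pvGridN T.toNat color := by
  unfold make_x_pattern_py
  by_cases hT : T = 1
  · subst hT
    simp [pvGridN, pvRowN, List.range_one]
  · simp only [beq_iff_eq, hT, if_false]
    rw [PySem.List.foldl_append_singleton_eq_map]
    simp only [List.nil_append, pvGridN]
    rw [PySem.List.pyRange_one]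
    simp only [List.map_map, Int.sub_zero]
    apply List.map_congr_left
    intro r hr
    simp only [List.mem_range] at hr
    simp only [Function.comp_apply, zero_add]
    have h := pv_row_eq T color (↑r) (by omega) (by omega)
    simpa using h

-- B's middle top row (diagonals coincide) equals the per-cell row.
theorem pv_top_mid (n : Nat) (color : Int) (k : Nat) (hc : 2 * k = n - 1) (hn : 1 ≤ n) :
    List.replicate k (0 : Int) ++ [color] ++ List.replicate k 0 = pvRowN n color k := by
  apply List.ext_getElem
  · simp [pvRowN]; omega
  · intro j hj hj'
    simp only [pvRowN, List.getElem_map, List.getElem_range, List.getElem_cons, List.getElem_append,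
      List.getElem_replicate, List.length_append, List.length_replicate,
      List.length_cons, List.length_nil, List.length_map,
      List.length_range] at hj hj' ⊢
    split_ifs <;> first | rfl | (exfalso; omega)

-- B's generic top row (two distinct diagonal cells) equals the per-cell row.
theorem pv_top_pair (n : Nat) (color : Int) (k : Nat) (hc : 2 * k ≤ n - 2) (hn : 2 ≤ n) :
    List.replicate k (0 : Int) ++ [color] ++ List.replicate (n - 2 - 2 * k) 0
      ++ [color] ++ List.replicate k 0 = pvRowN n color k := by
  apply List.ext_getElem
  · simp [pvRowN]; omega
  · intro j hj hj'
    simp only [pvRowN, List.getElem_map, List.getElem_range, List.getElem_cons, List.getElem_append,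
      List.getElem_replicate, List.length_append, List.length_replicate,
      List.length_cons, List.length_nil, List.length_map,
      List.length_range] at hj hj' ⊢
    split_ifs <;> first | rfl | (exfalso; omega)

-- vertical symmetry of the reference rows
theorem pv_rowN_symm (n : Nat) (color : Int) (k : Nat) (hk : k < n) :
    pvRowN n color (n - 1 - k) = pvRowN n color k := by
  unfold pvRowN
  apply List.map_congr_left
  intro c hc
  simp only [List.mem_range] at hc
  split_ifs <;> first | rfl | (exfalso; omega)

-- one element of B's top loop equals the per-cell reference row
theorem pv_elem (T color : Int) (k : Nat) (hTn : T = (T.toNat : Int))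
    (hn1 : 1 ≤ T.toNat) (hk : k < (T.toNat + 1) / 2) :
    (if 2 * (k : Int) == T - 1 then
        PySem.List.pyRepeat [(0 : Int)] (k : Int) ++ [color] ++ PySem.List.pyRepeat [(0 : Int)] (k : Int)
      else
        PySem.List.pyRepeat [(0 : Int)] (k : Int) ++ [color]
          ++ PySem.List.pyRepeat [(0 : Int)] (T - 2 - 2 * (k : Int)) ++ [color]
          ++ PySem.List.pyRepeat [(0 : Int)] (k : Int))
      = pvRowN T.toNat color k := by
  simp only [PySem.List.pyRepeat_singleton, Int.toNat_natCast]
  by_cases hc : 2 * k = T.toNat - 1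
  · rw [if_pos (by simp only [beq_iff_eq]; omega)]
    exact pv_top_mid T.toNat color k hc hn1
  · rw [if_neg (by simp only [beq_iff_eq]; omega)]
    have h2 : (T - 2 - 2 * (k : Int)).toNat = T.toNat - 2 - 2 * k := by omega
    rw [h2]
    exact pv_top_pair T.toNat color k (by omega) (by omega)

-- the reference grid is its top half followed by the mirrored strict top half
theorem pv_grid_mirror (n : Nat) (color : Int) :
    pvGridN n color = (List.range ((n + 1) / 2)).map (pvRowN n color)
      ++ ((List.range (n / 2)).map (pvRowN n color)).reverse := by
  apply List.ext_getElem
  · simp [pvGridN]; omega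
  · intro k hk hk'
    simp only [pvGridN, List.length_map, List.length_range] at hk
    simp only [pvGridN, List.getElem_map, List.getElem_range, List.getElem_append,
      List.length_map, List.length_range, List.getElem_reverse]
    split_ifs with h
    · rfl
    · have he : n / 2 - 1 - (k - (n + 1) / 2) = n - 1 - k := by omega
      rw [he, pv_rowN_symm n color k hk]

-- B equals the reference grid.
theorem pv_b_eq (T color : Int) : make_x_pattern_py_alt T color = pvGridN T.toNat color := by
  unfold make_x_pattern_py_alt
  by_cases hT : T ≤ 0
  · have hlt : PySem.Int.floordiv (T + 1) 2 < 1 :=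
      (PySem.Int.floordiv_lt_iff_lt_mul (by omega)).mpr (by omega)
    rw [PySem.List.pyRange_one_eq_nil (by omega)]
    have hn : T.toNat = 0 := by omega
    simp [hn, pvGridN, PySem.List.slice]
  · have hTn : T = (T.toNat : Int) := by omega
    have hn1 : 1 ≤ T.toNat := by omega
    have hm1 : PySem.Int.floordiv (T + 1) 2 = ((T.toNat + 1) / 2 : Nat) := by
      rw [hTn]
      have h : ((T.toNat : Int) + 1) = ((T.toNat + 1 : Nat) : Int) := by push_cast; ring
      rw [h]
      exact_mod_cast PySem.Int.floordiv_natCast (T.toNat + 1) 2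
    have hm2 : PySem.Int.floordiv T 2 = ((T.toNat / 2 : Nat) : Int) := by
      rw [hTn]; exact_mod_cast PySem.Int.floordiv_natCast T.toNat 2
    rw [hm1, hm2, PySem.List.pyRange_one, PySem.List.foldl_append_singleton_eq_map,
        List.nil_append]
    simp only [Int.sub_zero, Int.toNat_natCast, List.map_map]
    rw [pv_grid_mirror T.toNat color]
    congr 1
    · apply List.map_congr_left
      intro k hk
      simp only [List.mem_range] at hk
      simp only [Function.comp_apply, zero_add]
      exact pv_elem T color k hTn hn1 hk
    · simp only [PySem.List.slice_none_none, List.map_id']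
      rw [PySem.List.slice_to_natCast, ← List.map_take, List.take_range,
          Nat.min_eq_left (by omega)]
      congr 1
      apply List.map_congr_left
      intro k hk
      simp only [List.mem_range] at hk
      simp only [Function.comp_apply, zero_add]
      exact pv_elem T color k hTn hn1 (by omega)

-- ===== VERDICT (by name: the statement is the Claim_ definition above) =====
theorem make_x_pattern_py_spec : Claim_equal_make_x_pattern_py := by
  intro T color _
  unfold Spec_make_x_pattern_py
  rw [pv_a_eq, pv_b_eq]
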